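-- pv_equiv track=rewrite | github.com/pm4py/pm4py-core | pm4py/algo/discovery/dfg/utils/dfg_utils.py | max_occ_all_activ
-- ===== SOURCE A (Python) =====
-- def get_outgoing_edges(dfg):
--     """
--     Gets outgoing edges of the provided DFG graph
--     """
--     outgoing = {}
--     for el in dfg:
--         if type(el[0]) is str:
--             if not el[0] in outgoing:
--                 outgoing[el[0]] = {}
--             outgoing[el[0]][el[1]] = dfg[el]
--         else:
--             if not el[0][0] in outgoing:
--                 outgoing[el[0][0]] = {}
--             outgoing[el[0][0]][el[0][1]] = el[1]
--     return outgoing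
--
-- def get_ingoing_edges(dfg):
--     """
--     Get ingoing edges of the provided DFG graph
--     """
--     ingoing = {}
--     for el in dfg:
--         if type(el[0]) is str:
--             if not el[1] in ingoing:
--                 ingoing[el[1]] = {}
--             ingoing[el[1]][el[0]] = dfg[el]
--         else:
--             if not el[0][1] in ingoing:
--                 ingoing[el[0][1]] = {}
--             ingoing[el[0][1]][el[0][0]] = el[1]
--     return ingoing
--
-- def sum_ingoutg_val_activ(dict, activity):
--     """
--     Gets the sum of ingoing/outgoing values of an activity
--
--     Parameters
--     -----------
--     dict
--         Dictionary
--     activity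
--         Current examined activity
--
--     Returns
--     -----------
--     sum
--     """
--     sum = 0
--     for act2 in dict[activity]:
--         sum += dict[activity][act2]
--     return sum
--
-- def max_occ_all_activ(dfg):
--     """
--     Get maximum ingoing/outgoing sum of values related to attributes in DFG graph
--     """
--     ingoing = get_ingoing_edges(dfg)
--     outgoing = get_outgoing_edges(dfg)
--     max_value = -1
--
--     for act in ingoing:
--         sum = sum_ingoutg_val_activ(ingoing, act)
--         if sum > max_value:
--             max_value = sum
--
--     for act in outgoing:
--         sum = sum_ingoutg_val_activ(outgoing, act)
--         if sum > max_value: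
--             max_value = sum
--
--     return max_value
-- ===== SOURCE B (Python) =====
-- def max_occ_all_activ(dfg):
--     """
--     Get maximum ingoing/outgoing sum of values related to attributes in DFG graph
--
--     Single reverse pass with a seen-set (so the last value of a duplicate edge wins,
--     as dict overwrite does in the original), accumulating scalar per-activity totals.
--     """
--     in_total = {}
--     out_total = {}
--     seen = set()
--     for el in reversed(list(dfg)):
--         if type(el[0]) is str:
--             source, target, value = el[0], el[1], dfg[el]
--         else:
--             (source, target), value = el[0], el[1]
--         if (source, target) in seen:
--             continue
--         seen.add((source, target))
--         in_total[target] = in_total.get(target, 0) + value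
--         out_total[source] = out_total.get(source, 0) + value
--     max_value = -1
--     for v in in_total.values():
--         if v > max_value:
--             max_value = v
--     for v in out_total.values():
--         if v > max_value:
--             max_value = v
--     return max_value
-- ===== Notes on version B (the rewrite author's own statement) =====
-- stated objective: alternative
-- what changed: Replaces A's two nested adjacency dicts plus per-activity re-summing loops by a single reverse pass over the edges with a seen-set (so the last value of a duplicate edge wins, matching dict overwrite) that accumulates scalar in/out totals per activity, then takes the max of the totals.
import Mathlib
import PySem

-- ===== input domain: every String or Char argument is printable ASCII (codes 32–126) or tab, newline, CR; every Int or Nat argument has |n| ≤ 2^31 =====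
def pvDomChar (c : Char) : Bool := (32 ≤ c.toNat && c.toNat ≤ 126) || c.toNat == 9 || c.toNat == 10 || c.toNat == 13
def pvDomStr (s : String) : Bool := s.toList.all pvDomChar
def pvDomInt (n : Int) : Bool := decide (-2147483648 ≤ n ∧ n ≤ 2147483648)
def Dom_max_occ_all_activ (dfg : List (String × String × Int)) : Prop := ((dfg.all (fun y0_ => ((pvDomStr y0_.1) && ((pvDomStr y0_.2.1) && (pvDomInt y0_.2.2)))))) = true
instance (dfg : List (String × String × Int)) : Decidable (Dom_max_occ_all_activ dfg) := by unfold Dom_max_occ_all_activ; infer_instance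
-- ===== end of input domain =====

-- B replaces A's two nested adjacency dicts + per-activity summing loops by one reverse pass
-- with a seen-set and scalar in/out totals (alternative decomposition, same value everywhere).

-- ===== PORT A =====
-- Python `for el in dfg` over a dict yields the key (source, target) with value dfg[el];
-- on the Lean association list the element e carries them as (e.1, e.2.1, e.2.2).
def pvIngStep (ing : PySem.Dict String (PySem.Dict String Int)) (e : String × String × Int) :
    PySem.Dict String (PySem.Dict String Int) :=
  let ing1 := if ing.contains e.2.1 then ing else ing.insert e.2.1 PySem.Dict.empty
  ing1.insert e.2.1 ((ing1.getD e.2.1 PySem.Dict.empty).insert e.1 e.2.2)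

def pvOutStep (outg : PySem.Dict String (PySem.Dict String Int)) (e : String × String × Int) :
    PySem.Dict String (PySem.Dict String Int) :=
  let out1 := if outg.contains e.1 then outg else outg.insert e.1 PySem.Dict.empty
  out1.insert e.1 ((out1.getD e.1 PySem.Dict.empty).insert e.2.1 e.2.2)

def get_ingoing_edges (dfg : List (String × String × Int)) : PySem.Dict String (PySem.Dict String Int) :=
  dfg.foldl pvIngStep PySem.Dict.empty

def get_outgoing_edges (dfg : List (String × String × Int)) : PySem.Dict String (PySem.Dict String Int) :=
  dfg.foldl pvOutStep PySem.Dict.empty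

-- `dict[activity]` is only evaluated on keys of the dict in A, so getD is exact here
def sum_ingoutg_val_activ (d : PySem.Dict String (PySem.Dict String Int)) (activity : String) : Int :=
  (d.getD activity PySem.Dict.empty).keys.foldl
    (fun s act2 => s + (d.getD activity PySem.Dict.empty).getD act2 0) 0

def max_occ_all_activ (dfg : List (String × String × Int)) : Int :=
  let ingoing := get_ingoing_edges dfg
  let outgoing := get_outgoing_edges dfg
  let m1 := ingoing.keys.foldl
    (fun max_value act =>
      let s := sum_ingoutg_val_activ ingoing act
      if s > max_value then s else max_value) (-1)
  outgoing.keys.foldl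
    (fun max_value act =>
      let s := sum_ingoutg_val_activ outgoing act
      if s > max_value then s else max_value) m1

-- ===== PORT B =====
def pvBStep (st : PySem.Dict String Int × PySem.Dict String Int × PySem.Set (String × String))
    (e : String × String × Int) :
    PySem.Dict String Int × PySem.Dict String Int × PySem.Set (String × String) :=
  if st.2.2.contains (e.1, e.2.1) then st
  else (st.1.insert e.2.1 (st.1.getD e.2.1 0 + e.2.2),
        st.2.1.insert e.1 (st.2.1.getD e.1 0 + e.2.2),
        st.2.2.add (e.1, e.2.1))

def max_occ_all_activ_alt (dfg : List (String × String × Int)) : Int :=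
  let st := dfg.reverse.foldl pvBStep (PySem.Dict.empty, PySem.Dict.empty, ([] : PySem.Set (String × String)))
  let m1 := st.1.values.foldl (fun max_value v => if v > max_value then v else max_value) (-1)
  st.2.1.values.foldl (fun max_value v => if v > max_value then v else max_value) m1

-- ===== PRECONDITION & SPEC =====
def Spec_max_occ_all_activ (dfg : List (String × String × Int)) (out : Int) : Prop := out = max_occ_all_activ_alt dfg
instance (dfg : List (String × String × Int)) (out : Int) : Decidable (Spec_max_occ_all_activ dfg out) := by unfold Spec_max_occ_all_activ; infer_instance

-- ===== CLAIM (what is proved, stated in full; the proofs are below) =====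
def Claim_equal_max_occ_all_activ : Prop := ∀ (dfg : List (String × String × Int)), Dom_max_occ_all_activ dfg → Spec_max_occ_all_activ dfg (max_occ_all_activ dfg)

-- ===== LEMMAS AND PROOFS =====

-- `firstOccBy k l s`: the elements of l whose key (under k) was not seen before (seen set s)
def pvFO {α κ : Type} [DecidableEq κ] (k : α → κ) : List α → List κ → List α
  | [], _ => []
  | e :: r, s => if k e ∈ s then pvFO k r s else e :: pvFO k r (k e :: s)

theorem pvFO_congr {α κ : Type} [DecidableEq κ] (k : α → κ) (l : List α) {s s' : List κ}
    (h : ∀ y, y ∈ s ↔ y ∈ s') : pvFO k l s = pvFO k l s' := by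
  induction l generalizing s s' with
  | nil => rfl
  | cons e r ih =>
    simp only [pvFO]
    by_cases he : k e ∈ s
    · rw [if_pos he, if_pos ((h _).1 he)]; exact ih h
    · rw [if_neg he, if_neg (fun hc => he ((h _).2 hc))]
      exact congrArg _ (ih (by intro y; simp [List.mem_cons, h y]))

theorem pvFO_subset {α κ : Type} [DecidableEq κ] (k : α → κ) (l : List α) (s : List κ)
    {e : α} (h : e ∈ pvFO k l s) : e ∈ l := by
  induction l generalizing s with
  | nil => simp [pvFO] at h
  | cons e' r ih =>
    simp only [pvFO] at h
    split at h
    · exact List.mem_cons_of_mem _ (ih _ h)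
    · rcases List.mem_cons.1 h with h | h
      · simp [h]
      · exact List.mem_cons_of_mem _ (ih _ h)

theorem pvFO_key_not_seen {α κ : Type} [DecidableEq κ] (k : α → κ) (l : List α) (s : List κ)
    {e : α} (h : e ∈ pvFO k l s) : k e ∉ s := by
  induction l generalizing s with
  | nil => simp [pvFO] at h
  | cons e' r ih =>
    simp only [pvFO] at h
    split at h
    · exact ih _ h
    · rcases List.mem_cons.1 h with h | h
      · subst h; assumption
      · intro hc; exact ih _ h (List.mem_cons_of_mem _ hc)

theorem pvFO_keys_nodup {α κ : Type} [DecidableEq κ] (k : α → κ) (l : List α) (s : List κ) :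
    ((pvFO k l s).map k).Nodup := by
  induction l generalizing s with
  | nil => simp [pvFO]
  | cons e r ih =>
    simp only [pvFO]
    split
    · exact ih _
    · simp only [List.map_cons, List.nodup_cons]
      refine ⟨?_, ih _⟩
      intro hc
      rcases List.mem_map.1 hc with ⟨e', he', hk⟩
      exact pvFO_key_not_seen k r _ he' (by simp [hk])

theorem pvFO_fresh {α κ : Type} [DecidableEq κ] (k : α → κ) (l : List α) (s : List κ)
    {x : κ} (h : x ∉ l.map k) : pvFO k l (x :: s) = pvFO k l s := by
  induction l generalizing s with
  | nil => rfl
  | cons e r ih =>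
    have hx : k e ≠ x := by intro hc; exact h (by simp [hc.symm])
    have hr : x ∉ r.map k := fun hc => h (by simp [hc])
    simp only [pvFO, List.mem_cons]
    by_cases he : k e ∈ s
    · simp only [if_pos (Or.inr he), if_pos he]; exact ih _ hr
    · rw [if_neg (by rintro (h1 | h1); exact hx h1; exact he h1), if_neg he]
      refine congrArg _ ?_
      rw [pvFO_congr k r (s := k e :: x :: s) (s' := x :: k e :: s)
        (by intro y; simp [List.mem_cons]; tauto), ih _ hr]

theorem pvFO_drop {α κ : Type} [DecidableEq κ] (k : α → κ) (l : List α) (s : List κ)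
    {x : κ} (hx : x ∉ s) :
    pvFO k l (x :: s) = (pvFO k l s).filter (fun e => decide (k e ≠ x)) := by
  induction l generalizing s with
  | nil => rfl
  | cons e r ih =>
    simp only [pvFO, List.mem_cons]
    by_cases he : k e ∈ s
    · rw [if_pos (Or.inr he), if_pos he]
      exact ih _ hx
    · by_cases hex : k e = x
      · subst hex
        rw [if_pos (Or.inl rfl), if_neg he, List.filter_cons]
        simp only [ne_eq, not_true_eq_false, decide_false]
        rw [List.filter_eq_self.2 (fun a ha => by
          have := pvFO_key_not_seen k r _ ha
          simp only [List.mem_cons, not_or] at this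
          simp only [decide_eq_true_eq, ne_eq]
          exact this.1)]
        simp
      · rw [if_neg (by rintro (h1 | h1); exact hex h1; exact he h1), if_neg he, List.filter_cons]
        simp only [ne_eq, hex, not_false_eq_true, decide_true, if_pos]
        refine congrArg _ ?_
        rw [pvFO_congr k r (s := k e :: x :: s) (s' := x :: k e :: s)
          (by intro y; simp [List.mem_cons]; tauto)]
        exact ih (s := k e :: s) (by simp [List.mem_cons]; tauto)

theorem pvFO_mem_map_key {α κ : Type} [DecidableEq κ] (k : α → κ) (l : List α) (s : List κ)
    (x : κ) : x ∈ (pvFO k l s).map k ↔ x ∈ l.map k ∧ x ∉ s := by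
  induction l generalizing s with
  | nil => simp [pvFO]
  | cons e r ih =>
    simp only [pvFO]
    by_cases he : k e ∈ s
    · rw [if_pos he]
      simp only [List.map_cons, List.mem_cons, ih]
      constructor
      · rintro ⟨h1, h2⟩; exact ⟨Or.inr h1, h2⟩
      · rintro ⟨h1 | h1, h2⟩
        · exact absurd (h1 ▸ he) h2
        · exact ⟨h1, h2⟩
    · rw [if_neg he]
      simp only [List.map_cons, List.mem_cons, ih]
      constructor
      · rintro (h1 | ⟨h1, h2⟩)
        · exact ⟨Or.inl h1, h1 ▸ he⟩
        · exact ⟨Or.inr h1, fun hc => h2 (by simp [hc])⟩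
      · rintro ⟨h1 | h1, h2⟩
        · exact Or.inl h1
        · by_cases hx : x = k e
          · exact Or.inl hx
          · exact Or.inr ⟨h1, by simp only [List.mem_cons, not_or]; exact ⟨hx, h2⟩⟩

theorem pvFO_find? {α κ : Type} [DecidableEq κ] [BEq κ] [LawfulBEq κ] (k : α → κ) (l : List α) (s : List κ)
    {e0 : α} (h : e0 ∈ pvFO k l s) : l.find? (fun e => k e == k e0) = some e0 := by
  induction l generalizing s with
  | nil => simp [pvFO] at h
  | cons e r ih =>
    simp only [pvFO] at h
    by_cases he : k e ∈ s
    · rw [if_pos he] at h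
      have hne : k e ≠ k e0 := by
        intro hc; exact pvFO_key_not_seen k r s h (hc ▸ he)
      simp only [List.find?_cons, beq_eq_false_iff_ne.2 hne]
      exact ih _ h
    · rw [if_neg he] at h
      rcases List.mem_cons.1 h with h | h
      · subst h; simp [List.find?_cons]
      · have hne : k e ≠ k e0 := by
          intro hc
          exact pvFO_key_not_seen k r _ h (by simp [hc])
        simp only [List.find?_cons, beq_eq_false_iff_ne.2 hne]
        exact ih _ h

theorem pvFO_filter {α κ : Type} [DecidableEq κ] (k : α → κ) (q : κ → Bool) (l : List α) (s : List κ) :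
    (pvFO k l s).filter (fun e => q (k e)) = pvFO k (l.filter (fun e => q (k e))) s := by
  induction l generalizing s with
  | nil => rfl
  | cons e r ih =>
    by_cases he : k e ∈ s
    · simp only [pvFO, if_pos he, List.filter_cons]
      by_cases hq : q (k e) = true
      · rw [if_pos hq]
        simp only [pvFO, if_pos he]
        exact ih s
      · rw [if_neg hq]
        exact ih s
    · simp only [pvFO, if_neg he, List.filter_cons]
      by_cases hq : q (k e) = true
      · rw [if_pos hq, if_pos hq]
        simp only [pvFO, if_neg he]
        exact congrArg _ (ih _)
      · rw [if_neg hq, if_neg hq]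
        rw [ih _]
        by_cases hmem : k e ∈ (r.filter (fun e => q (k e))).map k
        · exfalso
          rcases List.mem_map.1 hmem with ⟨e', he', hk⟩
          have h2 := (List.mem_filter.1 he').2
          rw [hk] at h2; exact hq h2
        · exact pvFO_fresh k _ s hmem

theorem pvFO_key_switch {α κ κ' : Type} [DecidableEq κ] [DecidableEq κ'] (k : α → κ) (k' : α → κ')
    (q : κ → κ') (hq : ∀ x y, q x = q y → x = y) (l : List α) (sP : List κ') (sS : List κ)
    (hl : ∀ e ∈ l, k' e = q (k e)) (hs : ∀ x, q x ∈ sP ↔ x ∈ sS) :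
    pvFO k' l sP = pvFO k l sS := by
  induction l generalizing sP sS with
  | nil => rfl
  | cons e r ih =>
    have hke : k' e = q (k e) := hl e (by simp)
    simp only [pvFO, hke]
    by_cases he : k e ∈ sS
    · rw [if_pos ((hs _).2 he), if_pos he]
      exact ih _ _ (fun e' he' => hl e' (List.mem_cons_of_mem _ he')) hs
    · rw [if_neg (fun hc => he ((hs _).1 hc)), if_neg he]
      refine congrArg _ (ih _ _ (fun e' he' => hl e' (List.mem_cons_of_mem _ he')) ?_)
      intro x
      simp only [List.mem_cons]
      constructor
      · rintro (h1 | h1)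
        · exact Or.inl (hq _ _ h1)
        · exact Or.inr ((hs _).1 h1)
      · rintro (h1 | h1)
        · exact Or.inl (h1 ▸ rfl)
        · exact Or.inr ((hs _).2 h1)

theorem pvSum_update {κ : Type} (l : List κ) (f g : κ → Int) {x : κ} (hn : l.Nodup) (hx : x ∈ l)
    (h : ∀ y ∈ l, y ≠ x → f y = g y) : (l.map f).sum = (l.map g).sum + f x - g x := by
  induction l with
  | nil => simp at hx
  | cons y r ih =>
    simp only [List.nodup_cons] at hn
    rcases List.mem_cons.1 hx with hxy | hxr
    · subst hxy
      have : r.map f = r.map g := List.map_congr_left (fun a ha => h a (List.mem_cons_of_mem _ ha)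
        (fun hc => hn.1 (hc ▸ ha)))
      simp [this]; ring
    · have hy : y ≠ x := fun hc => hn.1 (hc ▸ hxr)
      have := ih hn.2 hxr (fun a ha => h a (List.mem_cons_of_mem _ ha))
      simp only [List.map_cons, List.sum_cons, this, h y (by simp) hy]; ring

theorem pvSum_filter_drop {α κ : Type} [DecidableEq κ] (k : α → κ) (v : α → Int) (l : List α)
    {e0 : α} (hn : (l.map k).Nodup) (he : e0 ∈ l) :
    (((l.filter (fun e => decide (k e ≠ k e0))).map v).sum) = (l.map v).sum - v e0 := by
  induction l with
  | nil => simp at he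
  | cons e r ih =>
    simp only [List.map_cons, List.nodup_cons] at hn
    rcases List.mem_cons.1 he with he1 | he1
    · subst he1
      rw [List.filter_cons]
      simp only [ne_eq, not_true_eq_false, decide_false]
      rw [List.filter_eq_self.2 ?_]
      · simp
      · intro a ha
        simp only [decide_eq_true_eq, ne_eq]
        intro hc; exact hn.1 (hc ▸ List.mem_map_of_mem ha)
    · have hke : k e ≠ k e0 := fun hc => hn.1 (hc ▸ List.mem_map_of_mem he1)
      rw [List.filter_cons, if_pos (by simp [hke] : decide (k e ≠ k e0) = true),
        List.map_cons, List.sum_cons, ih hn.2 he1]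
      simp only [List.map_cons, List.sum_cons]
      ring

theorem pvGet_fold_insert {α κ : Type} [DecidableEq κ] [BEq κ] [LawfulBEq κ] (k : α → κ) (v : α → Int)
    (m : List α) (d : PySem.Dict κ Int) (x : κ) :
    (m.foldl (fun d e => d.insert (k e) (v e)) d).get? x =
      (match m.reverse.find? (fun e => k e == x) with
       | some e => some (v e)
       | none => d.get? x) := by
  induction m generalizing d with
  | nil => simp
  | cons e r ih =>
    simp only [List.foldl_cons, List.reverse_cons, List.find?_append, ih]
    cases hf : r.reverse.find? (fun e => k e == x) with
    | some e' => simp [hf]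
    | none =>
      simp only [hf, Option.none_or, List.find?_cons, List.find?_nil]
      by_cases hx : k e = x
      · subst hx; simp [PySem.Dict.get?_insert]
      · rw [PySem.Dict.get?_insert, if_neg (fun hc => hx hc.symm)]
        simp [beq_eq_false_iff_ne.2 hx]


-- the source/target pair of an edge (the dict key in A's Python)
def pvPr (e : String × String × Int) : String × String := (e.1, e.2.1)

theorem pvIngStep_eq (d : PySem.Dict String (PySem.Dict String Int)) (e : String × String × Int) :
    pvIngStep d e = d.insert e.2.1 ((d.getD e.2.1 PySem.Dict.empty).insert e.1 e.2.2) := by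
  by_cases h : d.contains e.2.1 = true
  · simp [pvIngStep, h]
  · simp only [pvIngStep, Bool.not_eq_true] at h ⊢
    rw [if_neg (by simp [h])]
    rw [PySem.Dict.getD_insert_self, PySem.Dict.insert_insert_self,
      PySem.Dict.getD_of_not_contains _ _ h]

theorem pvOutStep_eq (d : PySem.Dict String (PySem.Dict String Int)) (e : String × String × Int) :
    pvOutStep d e = d.insert e.1 ((d.getD e.1 PySem.Dict.empty).insert e.2.1 e.2.2) := by
  by_cases h : d.contains e.1 = true
  · simp [pvOutStep, h]
  · simp only [pvOutStep, Bool.not_eq_true] at h ⊢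
    rw [if_neg (by simp [h])]
    rw [PySem.Dict.getD_insert_self, PySem.Dict.insert_insert_self,
      PySem.Dict.getD_of_not_contains _ _ h]

theorem pvNest_getD {α κ κ' : Type} [BEq κ] [LawfulBEq κ] [DecidableEq κ] [BEq κ'] [LawfulBEq κ']
    (k1 : α → κ) (k2 : α → κ') (vv : α → Int) (l : List α)
    (d : PySem.Dict κ (PySem.Dict κ' Int)) (t : κ) :
    (l.foldl (fun d e => d.insert (k1 e) ((d.getD (k1 e) PySem.Dict.empty).insert (k2 e) (vv e))) d).getD t PySem.Dict.empty
      = (l.filter (fun e => decide (k1 e = t))).foldl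
          (fun d' e => d'.insert (k2 e) (vv e)) (d.getD t PySem.Dict.empty) := by
  induction l generalizing d with
  | nil => rfl
  | cons e r ih =>
    simp only [List.foldl_cons, List.filter_cons]
    by_cases h : k1 e = t
    · rw [if_pos (by simp [h]), ih, List.foldl_cons, PySem.Dict.getD_insert]
      rw [if_pos h.symm, h]
    · rw [if_neg (by simp [h]), ih, PySem.Dict.getD_insert, if_neg (fun hc => h hc.symm)]

theorem pvSumKeys {α κ : Type} [BEq κ] [LawfulBEq κ] [DecidableEq κ] (k : α → κ) (v : α → Int)
    (m : List α) :
    ((PySem.Set.ofList (m.map k)).map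
        (fun x => (m.foldl (fun d e => d.insert (k e) (v e)) PySem.Dict.empty).getD x 0)).sum
      = ((pvFO k m.reverse []).map v).sum := by
  induction m using List.reverseRecOn with
  | nil => simp [pvFO]
  | append_singleton m' e ih =>
    rw [List.map_append]
    simp only [List.map_cons, List.map_nil]
    rw [PySem.Set.ofList_append_singleton, List.foldl_append, List.reverse_append]
    simp only [List.foldl_cons, List.foldl_nil,
      List.reverse_cons, List.reverse_nil, List.nil_append, List.singleton_append]
    rw [show pvFO k (e :: m'.reverse) [] = e :: pvFO k m'.reverse [k e] from by
      simp [pvFO]]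
    by_cases hm : k e ∈ m'.map k
    · rw [PySem.Set.add_of_mem (by simpa [PySem.Set.mem_ofList] using hm)]
      -- the dropped first occurrence (in reverse order) of key (k e)
      have hmem : k e ∈ (pvFO k m'.reverse []).map k := by
        rw [pvFO_mem_map_key]
        exact ⟨by simpa [List.map_reverse] using hm, by simp⟩
      rcases List.mem_map.1 hmem with ⟨e0, he0, hk0⟩
      have hget : (m'.foldl (fun d e => d.insert (k e) (v e)) PySem.Dict.empty).getD (k e) 0 = v e0 := by
        apply PySem.Dict.getD_of_get?_eq_some
        rw [pvGet_fold_insert]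
        rw [show (fun e' => k e' == k e) = (fun e' => k e' == k e0) from by simp [hk0]]
        rw [pvFO_find? k _ _ he0]
      rw [pvSum_update (PySem.Set.ofList (m'.map k))
        (fun x => ((m'.foldl (fun d e => d.insert (k e) (v e)) PySem.Dict.empty).insert (k e) (v e)).getD x 0)
        (fun x => (m'.foldl (fun d e => d.insert (k e) (v e)) PySem.Dict.empty).getD x 0)
        (PySem.Set.nodup_ofList _) ((PySem.Set.mem_ofList _ _).2 hm)
        (fun y _ hy => by simp [PySem.Dict.getD_insert, hy])]
      simp only [PySem.Dict.getD_insert_self]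
      rw [hget, ih]
      rw [pvFO_drop k _ _ (by simp), List.map_cons, List.sum_cons]
      rw [show (fun e' => decide (k e' ≠ k e)) = (fun e' => decide (k e' ≠ k e0)) from by simp [hk0]]
      rw [pvSum_filter_drop k v _ (pvFO_keys_nodup k _ _) he0]
      ring
    · rw [PySem.Set.add_of_not_mem (by simpa [PySem.Set.mem_ofList] using hm)]
      rw [List.map_append, List.sum_append]
      rw [show List.map
            (fun x => ((m'.foldl (fun d e => d.insert (k e) (v e)) PySem.Dict.empty).insert (k e) (v e)).getD x 0)
            (PySem.Set.ofList (m'.map k))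
          = List.map (fun x => (m'.foldl (fun d e => d.insert (k e) (v e)) PySem.Dict.empty).getD x 0)
            (PySem.Set.ofList (m'.map k)) from
        List.map_congr_left (fun x hx => by
          have hxne : x ≠ k e := fun hc => hm (hc ▸ (PySem.Set.mem_ofList _ _).1 hx)
          simp [PySem.Dict.getD_insert, hxne])]
      rw [ih, pvFO_fresh k _ _ (by simpa [List.map_reverse] using hm)]
      simp only [List.map_cons, List.map_nil, List.sum_cons, List.sum_nil,
        PySem.Dict.getD_insert_self]
      ring

theorem pvBfold_eq (r : List (String × String × Int)) (inT outT : PySem.Dict String Int)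
    (seen : PySem.Set (String × String)) :
    (r.foldl pvBStep (inT, outT, seen)).1
        = (pvFO pvPr r seen).foldl (fun d e => d.insert e.2.1 (d.getD e.2.1 0 + e.2.2)) inT
      ∧ (r.foldl pvBStep (inT, outT, seen)).2.1
        = (pvFO pvPr r seen).foldl (fun d e => d.insert e.1 (d.getD e.1 0 + e.2.2)) outT := by
  induction r generalizing inT outT seen with
  | nil => exact ⟨rfl, rfl⟩
  | cons e r ih =>
    simp only [List.foldl_cons, pvBStep]
    by_cases hc : seen.contains (e.1, e.2.1) = true
    · rw [if_pos hc]
      have hmem : pvPr e ∈ seen := (PySem.Set.contains_iff _ _).1 hc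
      rw [show pvFO pvPr (e :: r) seen = pvFO pvPr r seen from by
        simp only [pvFO, if_pos hmem]]
      exact ih inT outT seen
    · rw [if_neg hc]
      have hmem : pvPr e ∉ seen := fun hm => hc ((PySem.Set.contains_iff _ _).2 hm)
      rw [show pvFO pvPr (e :: r) seen = e :: pvFO pvPr r (pvPr e :: seen) from by
        simp only [pvFO, if_neg hmem]]
      simp only [List.foldl_cons]
      have hcongr : pvFO pvPr r (seen.add (e.1, e.2.1)) = pvFO pvPr r (pvPr e :: seen) :=
        pvFO_congr _ _ (fun y => by
          rw [show ((e.1, e.2.1) : String × String) = pvPr e from rfl]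
          simp only [PySem.Set.mem_add, List.mem_cons]; tauto)
      have := ih (inT.insert e.2.1 (inT.getD e.2.1 0 + e.2.2))
        (outT.insert e.1 (outT.getD e.1 0 + e.2.2)) (seen.add (e.1, e.2.1))
      rw [hcongr] at this
      exact this

theorem pvAccum_getD {α κ : Type} [BEq κ] [LawfulBEq κ] [DecidableEq κ] (k : α → κ) (v : α → Int)
    (l : List α) (d : PySem.Dict κ Int) (c : κ) :
    (l.foldl (fun d e => d.insert (k e) (d.getD (k e) 0 + v e)) d).getD c 0
      = d.getD c 0 + ((l.filter (fun e => decide (k e = c))).map v).sum := by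
  induction l generalizing d with
  | nil => simp
  | cons e r ih =>
    simp only [List.foldl_cons, List.filter_cons]
    by_cases h : k e = c
    · rw [if_pos (by simp [h]), ih, PySem.Dict.getD_insert, if_pos h.symm, h,
        List.map_cons, List.sum_cons]
      ring
    · rw [if_neg (by simp [h]), ih, PySem.Dict.getD_insert, if_neg (fun hc => h hc.symm)]

theorem pvIfMax (m s : Int) : (if s > m then s else m) = max m s := by omega

theorem pvFoldlIfMax {κ : Type} (f : κ → Int) (l : List κ) (b : Int) :
    l.foldl (fun m x => if f x > m then f x else m) b = (l.map f).foldl max b := by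
  induction l generalizing b with
  | nil => rfl
  | cons x r ih =>
    rw [List.foldl_cons, List.map_cons, List.foldl_cons, pvIfMax b (f x)]
    exact ih _

theorem pvFoldlIfMaxId (l : List Int) (b : Int) :
    l.foldl (fun m v => if v > m then v else m) b = l.foldl max b := by
  induction l generalizing b with
  | nil => rfl
  | cons x r ih =>
    rw [List.foldl_cons, List.foldl_cons, pvIfMax b x]
    exact ih _

theorem pvFO_mem_proj {α κ κ' : Type} [DecidableEq κ] (k : α → κ) (g : κ → κ') (l : List α)
    (x : κ') : x ∈ (pvFO k l []).map (fun e => g (k e)) ↔ x ∈ l.map (fun e => g (k e)) := by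
  constructor
  · intro h
    rcases List.mem_map.1 h with ⟨e, he, hx⟩
    exact List.mem_map.2 ⟨e, pvFO_subset k l [] he, hx⟩
  · intro h
    rcases List.mem_map.1 h with ⟨e, he, hx⟩
    have : k e ∈ (pvFO k l []).map k := by
      rw [pvFO_mem_map_key]
      exact ⟨List.mem_map_of_mem he, by simp⟩
    rcases List.mem_map.1 this with ⟨e', he', hk⟩
    exact List.mem_map.2 ⟨e', he', by rw [show g (k e') = g (k e) from by rw [hk], hx]⟩

theorem pvFO_mem_tgt (l : List (String × String × Int)) (t : String) :
    t ∈ (pvFO pvPr l []).map (fun e => e.2.1) ↔ t ∈ l.map (fun e => e.2.1) :=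
  pvFO_mem_proj pvPr Prod.snd l t

theorem pvFO_mem_src (l : List (String × String × Int)) (a : String) :
    a ∈ (pvFO pvPr l []).map (fun e => e.1) ↔ a ∈ l.map (fun e => e.1) :=
  pvFO_mem_proj pvPr Prod.fst l a

theorem pvIngStep_funext : pvIngStep = fun d (e : String × String × Int) =>
    d.insert e.2.1 ((d.getD e.2.1 PySem.Dict.empty).insert e.1 e.2.2) :=
  funext fun d => funext fun e => pvIngStep_eq d e

theorem pvOutStep_funext : pvOutStep = fun d (e : String × String × Int) =>
    d.insert e.1 ((d.getD e.1 PySem.Dict.empty).insert e.2.1 e.2.2) :=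
  funext fun d => funext fun e => pvOutStep_eq d e

-- A's per-activity ingoing sum, expressed over the deduplicated reverse pass
theorem pvAIn_eq (dfg : List (String × String × Int)) (t : String) :
    sum_ingoutg_val_activ (get_ingoing_edges dfg) t
      = (((pvFO pvPr dfg.reverse []).filter (fun e => decide (e.2.1 = t))).map
          (fun e => e.2.2)).sum := by
  have hm1 := pvNest_getD (fun e : String × String × Int => e.2.1) (fun e => e.1)
    (fun e => e.2.2) dfg PySem.Dict.empty t
  rw [sum_ingoutg_val_activ, PySem.List.foldl_add, zero_add, get_ingoing_edges, pvIngStep_funext, hm1]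
  have hd0 : (PySem.Dict.empty : PySem.Dict String (PySem.Dict String Int)).getD t PySem.Dict.empty
      = PySem.Dict.empty := rfl
  rw [hd0]
  have hkeys : ((dfg.filter (fun e => decide (e.2.1 = t))).foldl
      (fun d' e => d'.insert e.1 e.2.2) PySem.Dict.empty).keys
      = PySem.Set.ofList ((dfg.filter (fun e => decide (e.2.1 = t))).map (fun e => e.1)) := by
    have h := PySem.Dict.keys_foldl_insert_key (dfg.filter (fun e => decide (e.2.1 = t)))
      (fun e : String × String × Int => e.1) (fun _ e => e.2.2) PySem.Dict.empty
    simpa [PySem.Dict.keys_empty, PySem.Set.update_nil_left] using h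
  rw [hkeys]
  rw [pvSumKeys (fun e : String × String × Int => e.1) (fun e => e.2.2)
    (dfg.filter (fun e => decide (e.2.1 = t)))]
  have hswitch : pvFO pvPr (dfg.filter (fun e => decide (e.2.1 = t))).reverse []
      = pvFO (fun e : String × String × Int => e.1)
          (dfg.filter (fun e => decide (e.2.1 = t))).reverse [] := by
    apply pvFO_key_switch (k := fun e : String × String × Int => e.1) (k' := pvPr)
      (q := fun x => (x, t))
    · intro x y hxy
      exact congrArg Prod.fst hxy
    · intro e he
      have := List.of_mem_filter (List.mem_reverse.1 he)
      simp only [decide_eq_true_eq] at this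
      simp [pvPr, this]
    · intro x; simp
  rw [← hswitch, ← List.filter_reverse]
  exact congrArg _ (congrArg _ (pvFO_filter pvPr (fun x => decide (x.2 = t)) dfg.reverse []).symm)

-- A's per-activity outgoing sum, same canonical form
theorem pvAOut_eq (dfg : List (String × String × Int)) (a : String) :
    sum_ingoutg_val_activ (get_outgoing_edges dfg) a
      = (((pvFO pvPr dfg.reverse []).filter (fun e => decide (e.1 = a))).map
          (fun e => e.2.2)).sum := by
  have hm1 := pvNest_getD (fun e : String × String × Int => e.1) (fun e => e.2.1)
    (fun e => e.2.2) dfg PySem.Dict.empty a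
  rw [sum_ingoutg_val_activ, PySem.List.foldl_add, zero_add, get_outgoing_edges, pvOutStep_funext, hm1]
  have hd0 : (PySem.Dict.empty : PySem.Dict String (PySem.Dict String Int)).getD a PySem.Dict.empty
      = PySem.Dict.empty := rfl
  rw [hd0]
  have hkeys : ((dfg.filter (fun e => decide (e.1 = a))).foldl
      (fun d' e => d'.insert e.2.1 e.2.2) PySem.Dict.empty).keys
      = PySem.Set.ofList ((dfg.filter (fun e => decide (e.1 = a))).map (fun e => e.2.1)) := by
    have h := PySem.Dict.keys_foldl_insert_key (dfg.filter (fun e => decide (e.1 = a)))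
      (fun e : String × String × Int => e.2.1) (fun _ e => e.2.2) PySem.Dict.empty
    simpa [PySem.Dict.keys_empty, PySem.Set.update_nil_left] using h
  rw [hkeys]
  rw [pvSumKeys (fun e : String × String × Int => e.2.1) (fun e => e.2.2)
    (dfg.filter (fun e => decide (e.1 = a)))]
  have hswitch : pvFO pvPr (dfg.filter (fun e => decide (e.1 = a))).reverse []
      = pvFO (fun e : String × String × Int => e.2.1)
          (dfg.filter (fun e => decide (e.1 = a))).reverse [] := by
    apply pvFO_key_switch (k := fun e : String × String × Int => e.2.1) (k' := pvPr)
      (q := fun x => (a, x))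
    · intro x y hxy
      exact congrArg Prod.snd hxy
    · intro e he
      have := List.of_mem_filter (List.mem_reverse.1 he)
      simp only [decide_eq_true_eq] at this
      simp [pvPr, this]
    · intro x; simp
  rw [← hswitch, ← List.filter_reverse]
  exact congrArg _ (congrArg _ (pvFO_filter pvPr (fun x => decide (x.1 = a)) dfg.reverse []).symm)

theorem pvBIn_eq (dfg : List (String × String × Int)) (t : String) :
    (dfg.reverse.foldl pvBStep
        (PySem.Dict.empty, PySem.Dict.empty, ([] : PySem.Set (String × String)))).1.getD t 0
      = (((pvFO pvPr dfg.reverse []).filter (fun e => decide (e.2.1 = t))).map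
          (fun e => e.2.2)).sum := by
  rw [(pvBfold_eq dfg.reverse PySem.Dict.empty PySem.Dict.empty []).1]
  rw [pvAccum_getD (fun e : String × String × Int => e.2.1) (fun e => e.2.2)]
  simp

theorem pvBOut_eq (dfg : List (String × String × Int)) (a : String) :
    (dfg.reverse.foldl pvBStep
        (PySem.Dict.empty, PySem.Dict.empty, ([] : PySem.Set (String × String)))).2.1.getD a 0
      = (((pvFO pvPr dfg.reverse []).filter (fun e => decide (e.1 = a))).map
          (fun e => e.2.2)).sum := by
  rw [(pvBfold_eq dfg.reverse PySem.Dict.empty PySem.Dict.empty []).2]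
  rw [pvAccum_getD (fun e : String × String × Int => e.1) (fun e => e.2.2)]
  simp

-- ===== VERDICT (by name: the statement is the Claim_ definition above) =====
theorem max_occ_all_activ_spec : Claim_equal_max_occ_all_activ := by
  intro dfg _
  unfold Spec_max_occ_all_activ
  simp only [max_occ_all_activ, max_occ_all_activ_alt]
  rw [pvFoldlIfMax, pvFoldlIfMax, pvFoldlIfMaxId, pvFoldlIfMaxId,
    ← List.foldl_append, ← List.foldl_append]
  -- B's two total dicts, via the reverse-pass characterization
  have hInDict := (pvBfold_eq dfg.reverse PySem.Dict.empty PySem.Dict.empty []).1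
  have hOutDict := (pvBfold_eq dfg.reverse PySem.Dict.empty PySem.Dict.empty []).2
  have hnodupIn : (dfg.reverse.foldl pvBStep
      (PySem.Dict.empty, PySem.Dict.empty, ([] : PySem.Set (String × String)))).1.keys.Nodup := by
    rw [hInDict]
    exact PySem.Dict.nodup_keys_foldl_insert_key (pvFO pvPr dfg.reverse [])
      (fun e : String × String × Int => e.2.1) (fun d e => d.getD e.2.1 0 + e.2.2)
      PySem.Dict.empty (by rw [PySem.Dict.keys_empty]; exact List.nodup_nil)
  have hnodupOut : (dfg.reverse.foldl pvBStep
      (PySem.Dict.empty, PySem.Dict.empty, ([] : PySem.Set (String × String)))).2.1.keys.Nodup := by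
    rw [hOutDict]
    exact PySem.Dict.nodup_keys_foldl_insert_key (pvFO pvPr dfg.reverse [])
      (fun e : String × String × Int => e.1) (fun d e => d.getD e.1 0 + e.2.2)
      PySem.Dict.empty (by rw [PySem.Dict.keys_empty]; exact List.nodup_nil)
  rw [PySem.Dict.values_eq_map_keys _ hnodupIn 0, PySem.Dict.values_eq_map_keys _ hnodupOut 0]
  have hkBin : (dfg.reverse.foldl pvBStep
      (PySem.Dict.empty, PySem.Dict.empty, ([] : PySem.Set (String × String)))).1.keys
      = PySem.Set.ofList ((pvFO pvPr dfg.reverse []).map (fun e => e.2.1)) := by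
    rw [hInDict]
    have h := PySem.Dict.keys_foldl_insert_key (pvFO pvPr dfg.reverse [])
      (fun e : String × String × Int => e.2.1) (fun d e => d.getD e.2.1 0 + e.2.2) PySem.Dict.empty
    simpa [PySem.Dict.keys_empty, PySem.Set.update_nil_left] using h
  have hkBout : (dfg.reverse.foldl pvBStep
      (PySem.Dict.empty, PySem.Dict.empty, ([] : PySem.Set (String × String)))).2.1.keys
      = PySem.Set.ofList ((pvFO pvPr dfg.reverse []).map (fun e => e.1)) := by
    rw [hOutDict]
    have h := PySem.Dict.keys_foldl_insert_key (pvFO pvPr dfg.reverse [])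
      (fun e : String × String × Int => e.1) (fun d e => d.getD e.1 0 + e.2.2) PySem.Dict.empty
    simpa [PySem.Dict.keys_empty, PySem.Set.update_nil_left] using h
  rw [List.map_congr_left (fun t _ => pvBIn_eq dfg t),
    List.map_congr_left (fun a _ => pvBOut_eq dfg a), hkBin, hkBout]
  -- A's key lists
  have hkAin : (get_ingoing_edges dfg).keys
      = PySem.Set.ofList (dfg.map (fun e => e.2.1)) := by
    rw [get_ingoing_edges, pvIngStep_funext]
    have h := PySem.Dict.keys_foldl_insert_key dfg (fun e : String × String × Int => e.2.1)
      (fun d e => (d.getD e.2.1 PySem.Dict.empty).insert e.1 e.2.2) PySem.Dict.empty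
    simpa [PySem.Dict.keys_empty, PySem.Set.update_nil_left] using h
  have hkAout : (get_outgoing_edges dfg).keys
      = PySem.Set.ofList (dfg.map (fun e => e.1)) := by
    rw [get_outgoing_edges, pvOutStep_funext]
    have h := PySem.Dict.keys_foldl_insert_key dfg (fun e : String × String × Int => e.1)
      (fun d e => (d.getD e.1 PySem.Dict.empty).insert e.2.1 e.2.2) PySem.Dict.empty
    simpa [PySem.Dict.keys_empty, PySem.Set.update_nil_left] using h
  rw [List.map_congr_left (fun t _ => pvAIn_eq dfg t),
    List.map_congr_left (fun a _ => pvAOut_eq dfg a), hkAin, hkAout]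
  -- both sides are now max-folds of the same per-activity sums over key lists that are
  -- permutations of each other
  have hpermIn : (PySem.Set.ofList (dfg.map (fun e => e.2.1))).Perm
      (PySem.Set.ofList ((pvFO pvPr dfg.reverse []).map (fun e => e.2.1))) := by
    refine (List.perm_ext_iff_of_nodup (PySem.Set.nodup_ofList _) (PySem.Set.nodup_ofList _)).2
      (fun t => ?_)
    rw [PySem.Set.mem_ofList, PySem.Set.mem_ofList, pvFO_mem_tgt, List.map_reverse,
      List.mem_reverse]
  have hpermOut : (PySem.Set.ofList (dfg.map (fun e => e.1))).Perm
      (PySem.Set.ofList ((pvFO pvPr dfg.reverse []).map (fun e => e.1))) := by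
    refine (List.perm_ext_iff_of_nodup (PySem.Set.nodup_ofList _) (PySem.Set.nodup_ofList _)).2
      (fun a => ?_)
    rw [PySem.Set.mem_ofList, PySem.Set.mem_ofList, pvFO_mem_src, List.map_reverse,
      List.mem_reverse]
  exact ((hpermIn.map _).append (hpermOut.map _)).foldl_eq (-1)
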